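-- pv_equiv track=rewrite | github.com/contextlabs-ctrl/ai-doc-assistant | document_reader.py | _clean_pdf_text
-- ===== SOURCE A (Python) =====
-- def _clean_pdf_text(text):
--     lines = text.split("\n")
--     filtered = []
--
--     skip_keywords = ["journal", "doi", "received", "abstract", "keywords", "references", "copyright"]
--     end_keywords = ["references", "acknowledgment", "bibliography"]
--
--     end_section = False
--     for line in lines:
--         lower_line = line.strip().lower()
--         if any(k in lower_line for k in end_keywords):
--             end_section = True
--         if not end_section and not any(k in lower_line for k in skip_keywords):
--             if len(line.strip()) > 0:
--                 filtered.append(line.strip())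
--
--     return "\n".join(filtered)
-- ===== SOURCE B (Python) =====
-- def _clean_pdf_text(text):
--     lines = text.split("\n")
--
--     skip_keywords = ["journal", "doi", "received", "abstract", "keywords", "references", "copyright"]
--     end_keywords = ["references", "acknowledgment", "bibliography"]
--
--     cut = len(lines)
--     for i, line in enumerate(lines):
--         if any(k in line.strip().lower() for k in end_keywords):
--             cut = i
--             break
--
--     return "\n".join(
--         line.strip()
--         for line in lines[:cut]
--         if line.strip() and not any(k in line.strip().lower() for k in skip_keywords)
--     )
-- ===== Notes on version B (the rewrite author's own statement) =====
-- stated objective: simpler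
-- what changed: Replaces the stateful end_section flag threaded through one loop with an explicit two-phase truncate-then-filter: first find the cutoff index of the first end-keyword line, then a comprehension over the truncated prefix.
import Mathlib
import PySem

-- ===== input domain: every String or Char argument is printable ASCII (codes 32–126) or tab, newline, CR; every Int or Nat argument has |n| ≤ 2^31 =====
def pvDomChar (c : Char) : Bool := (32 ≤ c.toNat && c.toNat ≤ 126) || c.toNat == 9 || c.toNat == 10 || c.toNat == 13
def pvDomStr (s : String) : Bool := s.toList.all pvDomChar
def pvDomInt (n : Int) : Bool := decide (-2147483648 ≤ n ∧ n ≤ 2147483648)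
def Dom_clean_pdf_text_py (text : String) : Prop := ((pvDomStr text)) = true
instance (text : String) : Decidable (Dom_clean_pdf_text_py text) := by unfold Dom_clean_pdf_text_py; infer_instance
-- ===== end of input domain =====

-- B replaces A's stateful end_section flag with an explicit truncate-then-filter (find cutoff index, then comprehension); objective: simpler.

-- ===== PORT A =====
def pySkipKw : List String := ["journal", "doi", "received", "abstract", "keywords", "references", "copyright"]
def pyEndKw : List String := ["references", "acknowledgment", "bibliography"]

-- one iteration of A's for-loop over (filtered, end_section)
def pyStep (st : List String × Bool) (line : String) : List String × Bool :=
  let lowerLine := PySem.Str.lower (PySem.Str.strip line)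
  let endSection := pyEndKw.any (fun k => PySem.Str.isIn k lowerLine) || st.2
  let filtered :=
    if !endSection && !(pySkipKw.any (fun k => PySem.Str.isIn k lowerLine)) then
      if 0 < PySem.Str.len (PySem.Str.strip line) then st.1 ++ [PySem.Str.strip line] else st.1
    else st.1
  (filtered, endSection)

def clean_pdf_text_py (text : String) : String :=
  let lines := (PySem.Str.split? text "\n").getD []   -- sep "\n" ≠ "", so split? is always some
  let st := lines.foldl pyStep ([], false)
  PySem.Str.join "\n" st.1

-- ===== PORT B =====
def altIsEnd (line : String) : Bool :=
  pyEndKw.any (fun k => PySem.Str.isIn k (PySem.Str.lower (PySem.Str.strip line)))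

-- index of the first end-keyword line; length of the list if none (B's `cut`)
def altCut : List String → Nat
  | [] => 0
  | l :: rest => if altIsEnd l then 0 else altCut rest + 1

def altKeep (line : String) : Bool :=
  0 < PySem.Str.len (PySem.Str.strip line) &&
  !(pySkipKw.any (fun k => PySem.Str.isIn k (PySem.Str.lower (PySem.Str.strip line))))

def clean_pdf_text_py_alt (text : String) : String :=
  let lines := (PySem.Str.split? text "\n").getD []
  PySem.Str.join "\n" (((lines.take (altCut lines)).filter altKeep).map PySem.Str.strip)

-- ===== PRECONDITION & SPEC =====
def Spec_clean_pdf_text_py (text : String) (out : String) : Prop := out = clean_pdf_text_py_alt text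
instance (text : String) (out : String) : Decidable (Spec_clean_pdf_text_py text out) := by unfold Spec_clean_pdf_text_py; infer_instance

-- ===== CLAIM (what is proved, stated in full; the proofs are below) =====
def Claim_equal_clean_pdf_text_py : Prop := ∀ (text : String), Dom_clean_pdf_text_py text → Spec_clean_pdf_text_py text (clean_pdf_text_py text)

-- ===== LEMMAS AND PROOFS =====

-- once end_section is true, A's loop appends nothing more
lemma foldl_pyStep_true (lines : List String) (acc : List String) :
    lines.foldl pyStep (acc, true) = (acc, true) := by
  induction lines with
  | nil => rfl
  | cons l rest ih =>
      have hstep : pyStep (acc, true) l = (acc, true) := by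
        simp [pyStep]
      simpa [List.foldl, hstep] using ih

-- A's loop from a false flag = acc ++ B's truncate-then-filter of the remaining lines
lemma foldl_pyStep_false (lines : List String) (acc : List String) :
    (lines.foldl pyStep (acc, false)).1 =
      acc ++ ((lines.take (altCut lines)).filter altKeep).map PySem.Str.strip := by
  induction lines generalizing acc with
  | nil => simp [altCut]
  | cons l rest ih =>
      by_cases hend : altIsEnd l = true
      · have hend' : (pyEndKw.any fun k =>
            PySem.Str.isIn k (PySem.Str.lower (PySem.Str.strip l))) = true := hend
        have hstep : pyStep (acc, false) l = (acc, true) := by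
          simp only [pyStep]
          rw [hend']
          simp
        simp [List.foldl, hstep, foldl_pyStep_true, altCut, hend]
      · have hend' : (pyEndKw.any fun k =>
            PySem.Str.isIn k (PySem.Str.lower (PySem.Str.strip l))) = false := by
          simpa [altIsEnd] using hend
        have hstep : pyStep (acc, false) l =
            (if altKeep l then acc ++ [PySem.Str.strip l] else acc, false) := by
          simp only [pyStep, altKeep]
          rw [hend']
          simp
          rcases Classical.em (∀ x ∈ pySkipKw, PySem.Chars.isIn x.toList (PySem.Chars.lower (PySem.Chars.strip l.toList)) = false) with hP | hP
          · rcases Classical.em (0 < (PySem.Chars.strip l.toList).length) with hQ | hQ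
            · rw [if_pos hP, if_pos hQ, if_pos ⟨hQ, hP⟩]
            · rw [if_pos hP, if_neg hQ, if_neg (fun h => hQ h.1)]
          · rw [if_neg hP, if_neg (fun h => hP h.2)]
        rw [List.foldl_cons, hstep]
        by_cases hk : altKeep l = true
        · simp [altCut, hend, hk, ih]
        · simp only [Bool.not_eq_true] at hk
          simp [altCut, hend, hk, ih]

-- ===== VERDICT (by name: the statement is the Claim_ definition above) =====
theorem clean_pdf_text_py_spec : Claim_equal_clean_pdf_text_py := by
  intro text _
  simp only [Spec_clean_pdf_text_py, clean_pdf_text_py, clean_pdf_text_py_alt]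
  rw [foldl_pyStep_false]
  simp
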